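-- pv_equiv track=rewrite | github.com/pypi-data/pypi-mirror-380 | packages/architect-ai/architect_ai-0.1.2.tar.gz/architect_ai-0.1.2/src/architect_ai/client.py | _skip_non_object_value
-- ===== SOURCE A (Python) =====
-- def _skip_non_object_value(content: str, position: int) -> int:
--     """
--     Skip over non-object JSON values.
--
--     Args:
--         content (str): JSON content string
--         position (int): Current position in content
--
--     Returns:
--         int: Position after the skipped value
--     """
--     nesting_depth = 0
--     inside_string = False
--     while position < len(content):
--         current_char = content[position]
--         if inside_string:
--             if current_char == '"' and (position == 0 or content[position-1] != '\\'):
--                 inside_string = False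
--         else:
--             if current_char == '"':
--                 inside_string = True
--             elif current_char in ['{', '[']:
--                 nesting_depth += 1
--             elif current_char in ['}', ']']:
--                 nesting_depth -= 1
--             elif current_char == ',' and nesting_depth == 0:
--                 position += 1
--                 break
--             elif current_char == '}' and nesting_depth == -1:
--                 break
--         position += 1
--     return position
-- ===== SOURCE B (Python) =====
-- def _skip_non_object_value(content: str, position: int) -> int:
--     tail = content[position:]
--     # stage 1: mask[i] is True iff index i of tail is string-interior
--     # (content after an opening quote, up to and including the closing quote)
--     mask = []
--     inside = False
--     for i, c in enumerate(tail):
--         mask.append(inside)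
--         if c == '"':
--             if not inside:
--                 inside = True
--             elif tail[i - 1] != '\\':
--                 inside = False
--     # stage 2: pure depth scan over the annotated characters
--     depth = 0
--     for i, (c, m) in enumerate(zip(tail, mask)):
--         if m or c == '"':
--             continue
--         if c in '{[':
--             depth += 1
--         elif c in '}]':
--             depth -= 1
--         elif c == ',' and depth == 0:
--             return position + i + 1
--     return position + len(tail)
-- ===== Notes on version B (the rewrite author's own statement) =====
-- stated objective: alternative
-- what changed: Replaced A's single stateful loop (depth counter interleaved with an inside_string flag) by a staged pipeline: stage 1 builds an explicit boolean mask marking string-interior positions of content[position:], stage 2 is a pure depth scan over the (char, mask) pairs that ignores masked characters and quotes and stops after the first top-level comma.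
-- outside the precondition, e.g. on _skip_non_object_value('",a\\', -4): A returns 2, B returns 0
import Mathlib
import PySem

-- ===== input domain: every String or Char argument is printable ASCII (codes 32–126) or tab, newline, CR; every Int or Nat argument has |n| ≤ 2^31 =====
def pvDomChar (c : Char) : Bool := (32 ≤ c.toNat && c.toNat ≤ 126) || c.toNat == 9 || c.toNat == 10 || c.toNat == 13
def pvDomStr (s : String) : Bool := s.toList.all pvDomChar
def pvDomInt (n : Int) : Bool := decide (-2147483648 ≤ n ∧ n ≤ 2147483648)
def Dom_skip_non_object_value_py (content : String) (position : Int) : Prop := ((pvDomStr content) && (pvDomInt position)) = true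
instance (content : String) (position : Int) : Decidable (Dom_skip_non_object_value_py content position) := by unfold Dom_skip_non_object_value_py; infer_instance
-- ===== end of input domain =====

-- B replaces A's single stateful loop by a staged pipeline: first build an explicit
-- string-interior mask of content[position:], then a pure depth scan over the
-- (char, mask) pairs (different decomposition; not claimed faster).

-- ===== PORT A =====
-- A's while loop: state = (position, nesting_depth, inside_string);
-- fuel = number of remaining iterations, (len - position).toNat at entry, exact on every call chain
def aLoop (cs : List Char) : Nat → Int → Int → Bool → Int
  | 0, pos, _, _ => pos
  | fuel + 1, pos, depth, inStr =>
    if pos < (cs.length : Int) then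
      let c := (PySem.List.pyGet? cs pos).getD ' '
      if inStr then
        if c == '"' && (decide (pos = 0) || (PySem.List.pyGet? cs (pos - 1)).getD ' ' != '\\')
        then aLoop cs fuel (pos + 1) depth false
        else aLoop cs fuel (pos + 1) depth true
      else
        if c == '"' then aLoop cs fuel (pos + 1) depth true
        else if c == '{' || c == '[' then aLoop cs fuel (pos + 1) (depth + 1) false
        else if c == '}' || c == ']' then aLoop cs fuel (pos + 1) (depth - 1) false
        else if c == ',' && depth == 0 then pos + 1
        else if c == '}' && depth == -1 then pos   -- A's dead 'break' branch, kept as written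
        else aLoop cs fuel (pos + 1) depth false
    else pos

def skip_non_object_value_py (content : String) (position : Int) : Int :=
  aLoop content.toList (((content.toList.length : Int) - position).toNat) position 0 false

-- ===== PORT B =====
-- stage 1 of Source B: the mask list (mask[i] = inside flag when index i is reached);
-- prev carries tail[i-1] (read only when inside, i.e. never at i = 0; dummy ' ' initially)
def bMask (prev : Char) (inside : Bool) : List Char → List Bool
  | [] => []
  | c :: rest =>
    inside ::
      (if c == '"' then
        (if !inside then bMask c true rest
         else if prev != '\\' then bMask c false rest
         else bMask c inside rest)
       else bMask c inside rest)

-- stage 2 of Source B: 'for i, (c, m) in enumerate(zip(tail, mask))' with the depth counter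
def bScan (base : Int) : List (Char × Bool) → Int → Int → Int
  | [], i, _ => base + i
  | (c, m) :: rest, i, depth =>
    if m || c == '"' then bScan base rest (i + 1) depth
    else if c == '{' || c == '[' then bScan base rest (i + 1) (depth + 1)
    else if c == '}' || c == ']' then bScan base rest (i + 1) (depth - 1)
    else if c == ',' && depth == 0 then base + i + 1
    else bScan base rest (i + 1) depth

def skip_non_object_value_py_alt (content : String) (position : Int) : Int :=
  let tail := PySem.List.slice content.toList (some position) none
  bScan position (tail.zip (bMask ' ' false tail)) 0 0

-- ===== PRECONDITION & SPEC =====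
-- Pre_ excludes negative positions, on which A reads via Python's accidental
-- negative-index wraparound (and raises IndexError once position < -len(content)),
-- while B's slice content[position:] counts from the end.
def Pre_skip_non_object_value_py (content : String) (position : Int) : Prop := 0 ≤ position
instance (content : String) (position : Int) : Decidable (Pre_skip_non_object_value_py content position) := by
  unfold Pre_skip_non_object_value_py; infer_instance

def pvWitness_skip_non_object_value_py : String × Int := ("[1, 2], \"x\"", 0)

def Spec_skip_non_object_value_py (content : String) (position : Int) (out : Int) : Prop :=
  out = skip_non_object_value_py_alt content position
instance (content : String) (position : Int) (out : Int) : Decidable (Spec_skip_non_object_value_py content position out) := by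
  unfold Spec_skip_non_object_value_py; infer_instance

-- ===== CLAIM (what is proved, stated in full; the proofs are below) =====
def Claim_equal_skip_non_object_value_py : Prop := ∀ (content : String) (position : Int), Dom_skip_non_object_value_py content position → Pre_skip_non_object_value_py content position → Spec_skip_non_object_value_py content position (skip_non_object_value_py content position)

-- ===== LEMMAS AND PROOFS =====

-- common model of both programs: the offset past the skipped value, computed
-- structurally on the remaining characters (prev = previous char, read only when inside)
def aM (prev : Char) (inside : Bool) (depth : Int) : List Char → Int
  | [] => 0
  | c :: rest =>
    if inside then
      if c == '"' && prev != '\\' then 1 + aM c false depth rest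
      else 1 + aM c true depth rest
    else
      if c == '"' then 1 + aM c true depth rest
      else if c == '{' || c == '[' then 1 + aM c false (depth + 1) rest
      else if c == '}' || c == ']' then 1 + aM c false (depth - 1) rest
      else if c == ',' && depth == 0 then 1
      else 1 + aM c false depth rest

theorem drop_eq_cons_pyGet {cs : List Char} {n : Nat} {c : Char} {rest : List Char}
    (h : cs.drop n = c :: rest) : cs[n]? = some c ∧ cs.drop (n + 1) = rest := by
  have hlt : n < cs.length := by
    by_contra hge
    rw [List.drop_eq_nil_of_le (by omega)] at h
    exact (List.cons_ne_nil c rest) h.symm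
  have h0 : (cs.drop n)[0]? = some c := by rw [h]; rfl
  rw [List.getElem?_drop] at h0
  constructor
  · simpa using h0
  · have h1 : List.drop 1 (List.drop n cs) = List.drop (n + 1) cs := List.drop_drop
    rw [h] at h1
    simpa using h1.symm

theorem A_model (cs : List Char) : ∀ (l : List Char) (fuel : Nat) (pos depth : Int)
    (inside : Bool) (prev : Char),
    l = cs.drop pos.toNat → 0 ≤ pos →
    (inside = true → 1 ≤ pos ∧ prev = (PySem.List.pyGet? cs (pos - 1)).getD ' ') →
    (cs.length : Int) ≤ pos + fuel →
    aLoop cs fuel pos depth inside = pos + aM prev inside depth l := by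
  intro l
  induction l with
  | nil =>
    intro fuel pos depth inside prev hdrop hpos _ _
    have hge : ¬ pos < (cs.length : Int) := by
      intro hlt
      have h' := hdrop.symm
      rw [List.drop_eq_nil_iff] at h'
      omega
    cases fuel with
    | zero => simp [aLoop, aM]
    | succ f => rw [aLoop]; simp [hge, aM]
  | cons c rest ih =>
    intro fuel pos depth inside prev hdrop hpos hins hfuel
    obtain ⟨hget, hdrop'⟩ := drop_eq_cons_pyGet hdrop.symm
    have hlt : pos < (cs.length : Int) := by
      obtain ⟨hn, -⟩ := List.getElem?_eq_some_iff.mp hget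
      omega
    have hpy : PySem.List.pyGet? cs pos = some c := by
      rw [PySem.List.pyGet?_of_nonneg cs hpos]; exact hget
    have hprev' : (1 : Int) ≤ pos + 1 ∧ c = (PySem.List.pyGet? cs (pos + 1 - 1)).getD ' ' := by
      constructor
      · omega
      · simp [hpy]
    have hd' : rest = cs.drop (pos + 1).toNat := by
      rw [← hdrop']; congr 1; omega
    cases fuel with
    | zero => omega
    | succ f =>
      rw [aLoop]
      simp only [hlt, if_true, hpy, Option.getD_some]
      have hz : decide (pos = 0) = false ∨ inside = false := by
        cases inside
        · right; rfl
        · left; simp; have := (hins rfl).1; omega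
      cases inside with
      | true =>
        have ⟨h1, hp⟩ := hins rfl
        have hz' : decide (pos = 0) = false := by simp; omega
        rw [aM]
        simp only [hz', Bool.false_or, ← hp, if_true]
        by_cases hq : (c == '"' && prev != '\\') = true
        · rw [if_pos hq, if_pos hq,
            ih f (pos + 1) depth false c hd' (by omega) (by simp) (by omega)]
          ring
        · rw [if_neg hq, if_neg hq,
            ih f (pos + 1) depth true c hd' (by omega) (fun _ => hprev') (by omega)]
          ring
      | false =>
        rw [aM]
        simp only [Bool.false_eq_true, if_false]
        by_cases h1 : c = '"'
        · subst h1
          simp only [beq_self_eq_true, if_true]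
          rw [ih f (pos + 1) depth true '"' hd' (by omega) (fun _ => hprev') (by omega)]
          ring
        · simp only [beq_iff_eq, h1, if_false]
          by_cases h2 : (c == '{' || c == '[') = true
          · rw [if_pos h2, if_pos h2,
              ih f (pos + 1) (depth + 1) false c hd' (by omega) (by simp) (by omega)]
            ring
          · rw [if_neg h2, if_neg h2]
            by_cases h3 : (c == '}' || c == ']') = true
            · rw [if_pos h3, if_pos h3,
                ih f (pos + 1) (depth - 1) false c hd' (by omega) (by simp) (by omega)]
              ring
            · rw [if_neg h3, if_neg h3]
              by_cases h4 : (c == ',' && depth == 0) = true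
              · rw [if_pos h4, if_pos h4]
              · rw [if_neg h4, if_neg h4]
                have h5 : (c == '}' && depth == (-1 : Int)) = false := by
                  simp only [Bool.or_eq_true, beq_iff_eq] at h3
                  push Not at h3
                  simp [h3.1]
                rw [h5]
                simp only [Bool.false_eq_true, if_false]
                rw [ih f (pos + 1) depth false c hd' (by omega) (by simp) (by omega)]
                ring

theorem B_model : ∀ (l : List Char) (prev : Char) (inside : Bool) (base i depth : Int),
    bScan base (l.zip (bMask prev inside l)) i depth = base + i + aM prev inside depth l := by
  intro l
  induction l with
  | nil => intro prev inside base i depth; simp [bMask, bScan, aM]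
  | cons c rest ih =>
    intro prev inside base i depth
    rw [bMask, aM]
    cases inside with
    | true =>
      simp only [if_true, List.zip_cons_cons, bScan, Bool.true_or, if_true]
      by_cases hq : (c == '"' && prev != '\\') = true
      · have hc : c = '"' := by simp only [Bool.and_eq_true, beq_iff_eq] at hq; exact hq.1
        have hp : (prev != '\\') = true := by simp only [Bool.and_eq_true] at hq; exact hq.2
        rw [if_pos hq]
        simp only [hc, beq_self_eq_true, if_true, Bool.not_true, Bool.false_eq_true, if_false,
          hp, ih]
        ring
      · rw [if_neg hq]
        by_cases hc : c = '"'
        · have hp : (prev != '\\') = false := by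
            cases h : (prev != '\\') with
            | false => rfl
            | true => exact absurd (by simp [hc, h]) hq
          simp only [hc, beq_self_eq_true, if_true, Bool.not_true, Bool.false_eq_true, if_false,
            hp, ih]
          ring
        · simp only [beq_iff_eq, hc, if_false, ih]
          ring
    | false =>
      simp only [Bool.false_eq_true, if_false, List.zip_cons_cons, bScan, Bool.false_or]
      by_cases h1 : c = '"'
      · simp only [h1, beq_self_eq_true, if_true, Bool.not_false, ih]
        ring
      · simp only [beq_iff_eq, h1, if_false]
        by_cases h2 : (c == '{' || c == '[') = true
        · rw [if_pos h2, if_pos h2, ih]; ring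
        · rw [if_neg h2, if_neg h2]
          by_cases h3 : (c == '}' || c == ']') = true
          · rw [if_pos h3, if_pos h3, ih]; ring
          · rw [if_neg h3, if_neg h3]
            by_cases h4 : (c == ',' && depth == 0) = true
            · rw [if_pos h4, if_pos h4]
            · rw [if_neg h4, if_neg h4, ih]; ring

-- aM ignores prev when inside = false (prev is replaced by the current char in every branch)
theorem aM_prev_irrel (l : List Char) (p q : Char) (d : Int) :
    aM p false d l = aM q false d l := by
  cases l <;> simp [aM]

-- ===== VERDICT (by name: the statement is the Claim_ definition above) =====
theorem skip_non_object_value_py_spec : Claim_equal_skip_non_object_value_py := by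
  intro content position _ hpre
  unfold Spec_skip_non_object_value_py skip_non_object_value_py skip_non_object_value_py_alt
  rw [PySem.List.slice_from _ hpre]
  rw [A_model content.toList (content.toList.drop position.toNat)
      (((content.toList.length : Int) - position).toNat) position 0 false
      ((PySem.List.pyGet? content.toList (position - 1)).getD ' ') rfl hpre
      (by simp) (by omega)]
  rw [B_model]
  rw [aM_prev_irrel _ ' ' ((PySem.List.pyGet? content.toList (position - 1)).getD ' ')]
  ring
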